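-- pv_equiv track=rewrite | github.com/xcastilla/leetcode_practice | src/medium/1981_Minimize_the_Difference_Between_Target_and_Chosen_Elements.py | minimizeTheDifference
-- ===== SOURCE A (Python) =====
-- from typing import List
--
-- def minimizeTheDifference(mat: List[List[int]], target: int) -> int:
--     t = sorted(mat[0])
--     for i in range(1, len(mat)):
--         new_t = set()
--         for n in mat[i]:
--             for el in t:
--                 new_t.add(el + n)
--                 if el + n >= target:
--                     break
--         t = sorted(list(new_t))
--     return min([abs(target - el) for el in t])
-- ===== SOURCE B (Python) =====
-- from typing import List
--
-- def minimizeTheDifference(mat: List[List[int]], target: int) -> int: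
--     # Keep the reachable partial sums as an unsorted set; per element, keep
--     # every shifted sum below target plus the single smallest overshoot.
--     sums = set(mat[0])
--     for row in mat[1:]:
--         nxt = set()
--         for n in row:
--             shifted = [s + n for s in sums]
--             nxt.update(x for x in shifted if x < target)
--             overs = [x for x in shifted if x >= target]
--             if overs:
--                 nxt.add(min(overs))
--         sums = nxt
--     return min(abs(target - s) for s in sums)
-- ===== Notes on version B (the rewrite author's own statement) =====
-- stated objective: alternative
-- what changed: A keeps the partial sums as a sorted list and scans each row element with an early break after the first sum >= target; B keeps an unsorted set and per element adds the filtered sums below target plus min() of the overshoots directly, eliminating all sorting and the break logic.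
import Mathlib
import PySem

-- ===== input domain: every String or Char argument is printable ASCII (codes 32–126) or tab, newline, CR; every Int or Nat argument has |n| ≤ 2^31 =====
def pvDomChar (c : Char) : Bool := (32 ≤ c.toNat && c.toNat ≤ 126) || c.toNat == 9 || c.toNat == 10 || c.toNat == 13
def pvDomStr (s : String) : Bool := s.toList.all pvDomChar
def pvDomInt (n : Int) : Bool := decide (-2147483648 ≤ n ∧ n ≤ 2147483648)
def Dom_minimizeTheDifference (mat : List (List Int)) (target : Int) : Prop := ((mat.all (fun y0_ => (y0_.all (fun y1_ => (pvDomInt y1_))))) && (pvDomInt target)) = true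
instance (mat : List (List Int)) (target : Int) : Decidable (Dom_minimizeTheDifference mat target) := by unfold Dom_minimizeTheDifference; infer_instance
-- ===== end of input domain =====

-- B removes A's per-round sorting and early-break scan: it keeps the partial sums as an
-- unsorted set and, per row element, adds the sums below target plus the minimum overshoot.

-- ===== PORT A =====
-- inner 'for el in t: new_t.add(el+n); if el+n >= target: break'
def innerLoopA (target n : Int) : List Int → PySem.Set Int → PySem.Set Int
  | [], acc => acc
  | el :: rest, acc =>
      let acc' := PySem.Set.add acc (el + n)
      if target ≤ el + n then acc' else innerLoopA target n rest acc'

-- one iteration of 'for i in range(1, len(mat))': build new_t, then t = sorted(list(new_t))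
def rowStepA (target : Int) (t row : List Int) : List Int :=
  PySem.List.sorted (row.foldl (fun acc n => innerLoopA target n t acc) PySem.Set.empty)
    (fun x => x) false

def minimizeTheDifference (mat : List (List Int)) (target : Int) : Int :=
  match mat with
  | [] => 0  -- mat[0] raises IndexError in Python; excluded by Pre_
  | r0 :: rest =>
    let t := rest.foldl (fun t row => rowStepA target t row) (PySem.List.sorted r0 (fun x => x) false)
    -- min([...]) raises ValueError on an empty list; excluded by Pre_
    (PySem.List.min? (t.map (fun el => |target - el|)) (fun x => x)).getD 0

-- ===== PORT B =====
-- body of 'for n in row': nxt.update(filter < target); if overs: nxt.add(min(overs))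
def addRowB (target : Int) (sums acc : PySem.Set Int) (n : Int) : PySem.Set Int :=
  let shifted := sums.map (fun s => s + n)
  let acc1 := PySem.Set.update acc (shifted.filter (fun x => decide (x < target)))
  match PySem.List.min? (shifted.filter (fun x => decide (target ≤ x))) (fun x => x) with
  | some m => PySem.Set.add acc1 m
  | none => acc1

def minimizeTheDifference_alt (mat : List (List Int)) (target : Int) : Int :=
  match mat with
  | [] => 0  -- mat[0] raises IndexError in Python; excluded by Pre_
  | r0 :: rest =>
    let sums := rest.foldl (fun sums row => row.foldl (addRowB target sums) PySem.Set.empty)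
      (PySem.Set.ofList r0)
    (PySem.List.min? (sums.map (fun s => |target - s|)) (fun x => x)).getD 0

-- ===== PRECONDITION & SPEC =====
-- Pre_ excludes exactly the inputs where the Python A raises: mat = [] (IndexError on mat[0])
-- and any empty row (min of an empty sequence, ValueError); B raises there as well.
def Pre_minimizeTheDifference (mat : List (List Int)) (target : Int) : Prop :=
  mat ≠ [] ∧ ∀ row ∈ mat, row ≠ []
instance (mat : List (List Int)) (target : Int) : Decidable (Pre_minimizeTheDifference mat target) := by unfold Pre_minimizeTheDifference; infer_instance

def pvWitness_minimizeTheDifference : List (List Int) × Int := ([[1, 2], [3, 5]], 6)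

def Spec_minimizeTheDifference (mat : List (List Int)) (target : Int) (out : Int) : Prop := out = minimizeTheDifference_alt mat target
instance (mat : List (List Int)) (target : Int) (out : Int) : Decidable (Spec_minimizeTheDifference mat target out) := by unfold Spec_minimizeTheDifference; infer_instance

-- ===== CLAIM (what is proved, stated in full; the proofs are below) =====
def Claim_equal_minimizeTheDifference : Prop := ∀ (mat : List (List Int)) (target : Int), Dom_minimizeTheDifference mat target → Pre_minimizeTheDifference mat target → Spec_minimizeTheDifference mat target (minimizeTheDifference mat target)

-- ===== LEMMAS AND PROOFS =====

-- The value added to new_t by the break-scan / by B's filter+min step, characterised by value: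
-- all shifted sums below target, plus the minimum shifted sum >= target (if any).
def IsMinOver (t : List Int) (n target x : Int) : Prop :=
  target ≤ x ∧ (∃ el ∈ t, x = el + n) ∧ ∀ el ∈ t, target ≤ el + n → x ≤ el + n

def MemEq (l1 l2 : List Int) : Prop := ∀ x : Int, x ∈ l1 ↔ x ∈ l2

theorem IsMinOver_congr (t sums : List Int) (hm : MemEq t sums) (n target x : Int) :
    IsMinOver t n target x ↔ IsMinOver sums n target x := by
  unfold IsMinOver
  constructor
  · rintro ⟨h1, ⟨el, hel, h2⟩, h3⟩
    exact ⟨h1, ⟨el, (hm el).mp hel, h2⟩, fun e he ht => h3 e ((hm e).mpr he) ht⟩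
  · rintro ⟨h1, ⟨el, hel, h2⟩, h3⟩
    exact ⟨h1, ⟨el, (hm el).mpr hel, h2⟩, fun e he ht => h3 e ((hm e).mp he) ht⟩

theorem innerLoopA_mem (target n : Int) (t : List Int) (acc : PySem.Set Int)
    (hp : t.Pairwise (· ≤ ·)) (x : Int) :
    x ∈ innerLoopA target n t acc ↔
      x ∈ acc ∨ (∃ el ∈ t, x = el + n ∧ x < target) ∨ IsMinOver t n target x := by
  induction t generalizing acc with
  | nil => simp [innerLoopA, IsMinOver]
  | cons el rest ih =>
    rcases List.pairwise_cons.mp hp with ⟨hhead, htail⟩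
    by_cases hge : target ≤ el + n
    · simp only [innerLoopA, if_pos hge, PySem.Set.mem_add]
      constructor
      · rintro (hx | hx)
        · exact Or.inl hx
        · refine Or.inr (Or.inr ⟨hx ▸ hge, ⟨el, List.mem_cons_self .., hx⟩, ?_⟩)
          intro e he _
          rcases List.mem_cons.mp he with rfl | he'
          · omega
          · have := hhead e he'; omega
      · rintro (hx | ⟨e, he, rfl, hlt⟩ | ⟨h1, ⟨e, he, rfl⟩, h3⟩)
        · exact Or.inl hx
        · rcases List.mem_cons.mp he with rfl | he'
          · omega
          · have := hhead e he'; omega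
        · rcases List.mem_cons.mp he with rfl | he'
          · exact Or.inr rfl
          · have h4 := h3 el (List.mem_cons_self ..) hge
            have h5 := hhead e he'
            exact Or.inr (by omega)
    · simp only [innerLoopA, if_neg hge, ih (acc.add (el + n)) htail, PySem.Set.mem_add]
      have hiso : IsMinOver rest n target x ↔ IsMinOver (el :: rest) n target x := by
        unfold IsMinOver
        constructor
        · rintro ⟨h1, ⟨e, he, h2⟩, h3⟩
          refine ⟨h1, ⟨e, List.mem_cons_of_mem _ he, h2⟩, ?_⟩
          intro e' he' ht
          rcases List.mem_cons.mp he' with rfl | he''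
          · omega
          · exact h3 e' he'' ht
        · rintro ⟨h1, ⟨e, he, h2⟩, h3⟩
          rcases List.mem_cons.mp he with rfl | he'
          · omega
          · exact ⟨h1, ⟨e, he', h2⟩, fun e' he' ht => h3 e' (List.mem_cons_of_mem _ he') ht⟩
      constructor
      · rintro ((hx | rfl) | hx | hx)
        · exact Or.inl hx
        · exact Or.inr (Or.inl ⟨el, List.mem_cons_self .., rfl, by omega⟩)
        · rcases hx with ⟨e, he, h2⟩
          exact Or.inr (Or.inl ⟨e, List.mem_cons_of_mem _ he, h2⟩)
        · exact Or.inr (Or.inr (hiso.mp hx))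
      · rintro (hx | ⟨e, he, rfl, hlt⟩ | hx)
        · exact Or.inl (Or.inl hx)
        · rcases List.mem_cons.mp he with rfl | he'
          · exact Or.inl (Or.inr rfl)
          · exact Or.inr (Or.inl ⟨e, he', rfl, hlt⟩)
        · exact Or.inr (Or.inr (hiso.mpr hx))

theorem addRowB_mem (target : Int) (sums acc : PySem.Set Int) (n x : Int) :
    x ∈ addRowB target sums acc n ↔
      x ∈ acc ∨ (∃ el ∈ sums, x = el + n ∧ x < target) ∨ IsMinOver sums n target x := by
  unfold addRowB
  dsimp only
  have hlo : ∀ y : Int, y ∈ (sums.map (fun s => s + n)).filter (fun x => decide (x < target)) ↔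
      (∃ el ∈ sums, y = el + n ∧ y < target) := by
    intro y
    simp only [List.mem_filter, List.mem_map, decide_eq_true_eq]
    constructor
    · rintro ⟨⟨e, he, rfl⟩, h2⟩; exact ⟨e, he, rfl, h2⟩
    · rintro ⟨e, he, rfl, h2⟩; exact ⟨⟨e, he, rfl⟩, h2⟩
  have hhi : ∀ y : Int, y ∈ (sums.map (fun s => s + n)).filter (fun x => decide (target ≤ x)) ↔
      ((∃ el ∈ sums, y = el + n) ∧ target ≤ y) := by
    intro y
    simp only [List.mem_filter, List.mem_map, decide_eq_true_eq]
    constructor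
    · rintro ⟨⟨e, he, rfl⟩, h2⟩; exact ⟨⟨e, he, rfl⟩, h2⟩
    · rintro ⟨⟨e, he, rfl⟩, h2⟩; exact ⟨⟨e, he, rfl⟩, h2⟩
  cases hmin : PySem.List.min? ((sums.map (fun s => s + n)).filter (fun x => decide (target ≤ x))) (fun x => x) with
  | none =>
    have hempty := (PySem.List.min?_eq_none_iff _ _).mp hmin
    have hno : ¬ IsMinOver sums n target x := by
      rintro ⟨h1, ⟨e, he, rfl⟩, _⟩
      have hin : (e + n) ∈ List.filter (fun x => decide (target ≤ x)) (List.map (fun s => s + n) sums) :=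
        (hhi _).mpr ⟨⟨e, he, rfl⟩, h1⟩
      rw [hempty] at hin
      simp at hin
    simp only [PySem.Set.mem_update, hlo x]
    constructor
    · rintro (h | h)
      exacts [Or.inl h, Or.inr (Or.inl h)]
    · rintro (h | h | h)
      exacts [Or.inl h, Or.inr h, absurd h hno]
  | some m =>
    have hmem := PySem.List.min?_mem hmin
    have hmin' := PySem.List.min?_isMin hmin
    rcases (hhi m).mp hmem with ⟨⟨e0, he0, hm0⟩, htm⟩
    have hiff : IsMinOver sums n target x ↔ x = m := by
      constructor
      · rintro ⟨h1, ⟨e, he, rfl⟩, h3⟩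
        have hxmem : (e + n) ∈ (sums.map (fun s => s + n)).filter (fun x => decide (target ≤ x)) :=
          (hhi _).mpr ⟨⟨e, he, rfl⟩, h1⟩
        have h4 : m ≤ e + n := hmin' _ hxmem
        have h5 : e + n ≤ m := hm0 ▸ h3 e0 he0 (hm0 ▸ htm)
        omega
      · rintro rfl
        refine ⟨htm, ⟨e0, he0, hm0⟩, ?_⟩
        intro e he ht
        exact hmin' _ ((hhi _).mpr ⟨⟨e, he, rfl⟩, ht⟩)
    simp only [PySem.Set.mem_add, PySem.Set.mem_update, hlo x, hiff]
    constructor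
    · rintro ((h | h) | h)
      exacts [Or.inl h, Or.inr (Or.inl h), Or.inr (Or.inr h)]
    · rintro (h | h | h)
      exacts [Or.inl (Or.inl h), Or.inl (Or.inr h), Or.inr h]

theorem row_fold_mem (target : Int) (t sums : List Int) (hp : t.Pairwise (· ≤ ·))
    (hm : MemEq t sums) (row : List Int) (accA accB : PySem.Set Int) (hacc : MemEq accA accB) :
    MemEq (row.foldl (fun acc n => innerLoopA target n t acc) accA)
          (row.foldl (addRowB target sums) accB) := by
  induction row generalizing accA accB with
  | nil => exact hacc
  | cons n rest ih =>
    refine ih (innerLoopA target n t accA) (addRowB target sums accB n) ?_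
    intro x
    rw [innerLoopA_mem target n t accA hp x, addRowB_mem target sums accB n x]
    have h1 : (∃ el ∈ t, x = el + n ∧ x < target) ↔ (∃ el ∈ sums, x = el + n ∧ x < target) := by
      constructor
      · rintro ⟨e, he, h⟩; exact ⟨e, (hm e).mp he, h⟩
      · rintro ⟨e, he, h⟩; exact ⟨e, (hm e).mpr he, h⟩
    rw [h1, IsMinOver_congr t sums hm, hacc x]

theorem min?_congr (l1 l2 : List Int) (h : MemEq l1 l2) :
    PySem.List.min? l1 (fun x => x) = PySem.List.min? l2 (fun x => x) := by
  cases h1 : PySem.List.min? l1 (fun x => x) with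
  | none =>
    rw [PySem.List.min?_eq_none_iff] at h1
    cases h2 : PySem.List.min? l2 (fun x => x) with
    | none => rfl
    | some m2 =>
      have hmem := PySem.List.min?_mem h2
      have : m2 ∈ l1 := (h m2).mpr hmem
      simp [h1] at this
  | some m1 =>
    have hm1 := PySem.List.min?_mem h1
    have hmin1 := PySem.List.min?_isMin h1
    cases h2 : PySem.List.min? l2 (fun x => x) with
    | none =>
      rw [PySem.List.min?_eq_none_iff] at h2
      have : m1 ∈ l2 := (h m1).mp hm1
      simp [h2] at this
    | some m2 =>
      have hm2 := PySem.List.min?_mem h2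
      have hmin2 := PySem.List.min?_isMin h2
      have a1 : m1 ≤ m2 := hmin1 m2 ((h m2).mpr hm2)
      have a2 : m2 ≤ m1 := hmin2 m1 ((h m1).mp hm1)
      have : m1 = m2 := le_antisymm a1 a2
      simp [this]

theorem outer_fold_mem (target : Int) (rest : List (List Int)) :
    ∀ (t sums : List Int), t.Pairwise (· ≤ ·) → MemEq t sums →
    MemEq (rest.foldl (fun t row => rowStepA target t row) t)
          (rest.foldl (fun s row => row.foldl (addRowB target s) PySem.Set.empty) sums) := by
  induction rest with
  | nil => intro t sums _ hm; exact hm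
  | cons row rest' ih =>
    intro t sums hp hm
    simp only [List.foldl_cons]
    refine ih _ _ ?_ ?_
    · exact PySem.List.sorted_pairwise _ _
    · intro x
      rw [rowStepA, PySem.List.mem_sorted]
      exact row_fold_mem target t sums hp hm row PySem.Set.empty PySem.Set.empty (fun _ => Iff.rfl) x

theorem minimizeTheDifference_eq (mat : List (List Int)) (target : Int) :
    minimizeTheDifference mat target = minimizeTheDifference_alt mat target := by
  cases mat with
  | nil => rfl
  | cons r0 rest =>
    unfold minimizeTheDifference minimizeTheDifference_alt
    dsimp only
    have hmem : MemEq (rest.foldl (fun t row => rowStepA target t row) (PySem.List.sorted r0 (fun x => x) false))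
        (rest.foldl (fun s row => row.foldl (addRowB target s) PySem.Set.empty) (PySem.Set.ofList r0)) := by
      refine outer_fold_mem target rest _ _ (PySem.List.sorted_pairwise _ _) ?_
      intro x
      rw [PySem.List.mem_sorted, PySem.Set.mem_ofList]
    have hmap : MemEq ((rest.foldl (fun t row => rowStepA target t row) (PySem.List.sorted r0 (fun x => x) false)).map (fun el => |target - el|))
        ((rest.foldl (fun s row => row.foldl (addRowB target s) PySem.Set.empty) (PySem.Set.ofList r0)).map (fun s => |target - s|)) := by
      intro x
      simp only [List.mem_map]
      constructor
      · rintro ⟨e, he, rfl⟩; exact ⟨e, (hmem e).mp he, rfl⟩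
      · rintro ⟨e, he, rfl⟩; exact ⟨e, (hmem e).mpr he, rfl⟩
    rw [min?_congr _ _ hmap]

-- ===== VERDICT (by name: the statement is the Claim_ definition above) =====
theorem minimizeTheDifference_spec : Claim_equal_minimizeTheDifference := by
  intro mat target _ _
  exact minimizeTheDifference_eq mat target
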